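-- pv_equiv track=rewrite | github.com/brent-page/psp-servers-interface-g | staging.py | to_latest_ver
-- ===== SOURCE A (Python) =====
-- def to_latest_ver(pattern_results):
--     vers_collected = {}
--     latest_ver_files = []
--     for fname in pattern_results:
--         if fname[:-8] not in vers_collected.keys():
--             vers_collected[fname[:-8]] = [fname]
--         else:
--             vers_collected[fname[:-8]].append(fname)
--     for file_list in vers_collected.values():
--         file_list.sort()
--         latest_ver_files.append(file_list[-1])
--     return latest_ver_files
-- ===== SOURCE B (Python) =====
-- def to_latest_ver(pattern_results):
--     best = {}
--     for fname in pattern_results: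
--         key = fname[:-8]
--         if key not in best or fname >= best[key]:
--             best[key] = fname
--     return list(best.values())
-- ===== Notes on version B (the rewrite author's own statement) =====
-- stated objective: faster
-- what changed: B replaces the group-into-lists-then-sort-each-group algorithm by a single pass that keeps one running maximum per prefix (updated on >=, which matches the last element of a stable sort), returning the dict's values directly.
import Mathlib
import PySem

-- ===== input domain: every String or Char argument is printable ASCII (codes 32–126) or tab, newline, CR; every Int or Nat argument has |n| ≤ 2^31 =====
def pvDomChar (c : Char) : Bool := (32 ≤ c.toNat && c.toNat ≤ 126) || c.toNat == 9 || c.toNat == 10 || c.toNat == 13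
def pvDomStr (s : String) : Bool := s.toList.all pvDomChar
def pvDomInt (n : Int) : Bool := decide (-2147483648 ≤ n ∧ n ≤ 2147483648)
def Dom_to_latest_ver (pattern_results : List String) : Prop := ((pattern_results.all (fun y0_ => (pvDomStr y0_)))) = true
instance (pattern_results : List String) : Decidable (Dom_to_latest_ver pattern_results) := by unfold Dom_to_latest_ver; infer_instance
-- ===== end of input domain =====

-- B replaces A's group-into-lists-then-sort-each-group by a single pass keeping one
-- running maximum per prefix (updated on >=, which is exactly the last element of a
-- stable sort of the group); same return value.

-- ===== PORT A =====
-- fname[:-8]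
def pvKey (s : String) : String := String.ofList (PySem.List.slice s.toList none (some (-8)))

-- the body of A's first loop
def pvStepA (d : PySem.Dict String (List String)) (fname : String) : PySem.Dict String (List String) :=
  if d.contains (pvKey fname) = false then
    d.insert (pvKey fname) [fname]
  else
    d.modify (pvKey fname) [] (fun l => l ++ [fname])

def to_latest_ver (pattern_results : List String) : List String :=
  -- second loop: file_list.sort(); latest_ver_files.append(file_list[-1]).
  -- every group list is nonempty by construction, so pyGetD's default "" is never read
  (pattern_results.foldl pvStepA PySem.Dict.empty).values.foldl
    (fun latest_ver_files file_list =>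
      latest_ver_files ++
        [PySem.List.pyGetD (PySem.List.sorted file_list (fun x => x) false) (-1) ""]) []

-- ===== PORT B =====
-- the body of B's loop: 'if key not in best or fname >= best[key]: best[key] = fname'
def pvStepB (d : PySem.Dict String String) (fname : String) : PySem.Dict String String :=
  if !(d.contains (pvKey fname)) || decide ((d.getD (pvKey fname) "") ≤ fname) then
    d.insert (pvKey fname) fname
  else
    d

def to_latest_ver_alt (pattern_results : List String) : List String :=
  (pattern_results.foldl pvStepB PySem.Dict.empty).values

-- ===== PRECONDITION & SPEC =====
def Spec_to_latest_ver (pattern_results : List String) (out : List String) : Prop := out = to_latest_ver_alt pattern_results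
instance (pattern_results : List String) (out : List String) : Decidable (Spec_to_latest_ver pattern_results out) := by unfold Spec_to_latest_ver; infer_instance

-- ===== CLAIM (what is proved, stated in full; the proofs are below) =====
def Claim_equal_to_latest_ver : Prop := ∀ (pattern_results : List String), Dom_to_latest_ver pattern_results → Spec_to_latest_ver pattern_results (to_latest_ver pattern_results)

-- ===== LEMMAS AND PROOFS =====

-- invariant relating A's dict of group lists to B's dict of running maxima
def pvInv (dA : PySem.Dict String (List String)) (dB : PySem.Dict String String) : Prop :=
  dA.keys.Nodup ∧ dA.keys = dB.keys ∧
  ∀ k, dA.contains k = true →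
    ∃ x t, dA.getD k [] = x :: t ∧ dB.getD k "" = t.foldl max x

lemma pvInv_empty : pvInv PySem.Dict.empty PySem.Dict.empty := by
  refine ⟨by simp [pysem], by simp [pysem], ?_⟩
  intro k hk
  simp [pysem] at hk

lemma pvInv_step (dA : PySem.Dict String (List String)) (dB : PySem.Dict String String)
    (f : String) (h : pvInv dA dB) : pvInv (pvStepA dA f) (pvStepB dB f) := by
  obtain ⟨hnd, hkeys, hval⟩ := h
  have hcontains : ∀ k, dB.contains k = dA.contains k := by
    intro k
    by_cases hm : k ∈ dA.keys
    · rw [(PySem.Dict.contains_iff_mem_keys dA k).mpr hm,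
        (PySem.Dict.contains_iff_mem_keys dB k).mpr (hkeys ▸ hm)]
    · have h1 : ¬ dA.contains k = true := fun hc => hm ((PySem.Dict.contains_iff_mem_keys dA k).mp hc)
      have h2 : ¬ dB.contains k = true := fun hc => hm (hkeys ▸ (PySem.Dict.contains_iff_mem_keys dB k).mp hc)
      simp at h1 h2; rw [h1, h2]
  by_cases hc : dA.contains (pvKey f) = true
  · -- key already present: A appends, B keeps the max
    obtain ⟨x, t, hA, hB⟩ := hval (pvKey f) hc
    have hstepA : pvStepA dA f = dA.modify (pvKey f) [] (fun l => l ++ [f]) := by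
      simp [pvStepA, hc]
    have hkA : (pvStepA dA f).keys = dA.keys := by
      rw [hstepA, PySem.Dict.keys_modify, PySem.Dict.keys_insert_of_contains _ _ hc]
    have hcB : dB.contains (pvKey f) = true := by rw [hcontains]; exact hc
    have hkB : (pvStepB dB f).keys = dB.keys := by
      unfold pvStepB
      split
      · exact PySem.Dict.keys_insert_of_contains _ _ hcB
      · rfl
    refine ⟨hkA ▸ hnd, by rw [hkA, hkB, hkeys], ?_⟩
    intro k hk
    have hk' : dA.contains k = true := by
      rw [hstepA] at hk
      rw [PySem.Dict.contains_modify] at hk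
      rcases Bool.or_eq_true_iff.mp hk with h1 | h1
      · rw [eq_of_beq h1]; exact hc
      · exact h1
    by_cases hkk : k = pvKey f
    · subst hkk
      refine ⟨x, t ++ [f], ?_, ?_⟩
      · rw [hstepA, PySem.Dict.getD_modify_self, hA]; rfl
      · have hgB : (pvStepB dB f).getD (pvKey f) "" = max (t.foldl max x) f := by
          unfold pvStepB
          rw [hcB]
          by_cases hle : dB.getD (pvKey f) "" ≤ f
          · simp only [hle, decide_true, Bool.or_true, if_true]
            rw [PySem.Dict.getD_insert_self]
            rw [hB] at hle
            rw [max_eq_right hle]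
          · simp only [hle, decide_false, Bool.or_false, Bool.not_eq_true']
            rw [if_neg (by simp)]
            rw [hB] at hle
            rw [max_eq_left (le_of_not_ge hle)]
            exact hB
        rw [hgB, List.foldl_append]
        rfl
    · obtain ⟨x', t', hA', hB'⟩ := hval k hk'
      refine ⟨x', t', ?_, ?_⟩
      · rw [hstepA, PySem.Dict.getD_modify_of_ne _ _ _ hkk, hA']
      · have : (pvStepB dB f).getD k "" = dB.getD k "" := by
          unfold pvStepB
          split
          · exact PySem.Dict.getD_insert_of_ne _ _ _ hkk
          · rfl
        rw [this, hB']
  · -- fresh key: both insert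
    have hc' : dA.contains (pvKey f) = false := by simpa using hc
    have hcB : dB.contains (pvKey f) = false := by rw [hcontains]; exact hc'
    have hstepA : pvStepA dA f = dA.insert (pvKey f) [f] := by simp [pvStepA, hc']
    have hstepB : pvStepB dB f = dB.insert (pvKey f) f := by
      unfold pvStepB; rw [hcB]; simp
    refine ⟨?_, ?_, ?_⟩
    · rw [hstepA]; exact PySem.Dict.nodup_keys_insert _ _ _ hnd
    · rw [hstepA, hstepB, PySem.Dict.keys_insert_of_not_contains _ _ hc',
        PySem.Dict.keys_insert_of_not_contains _ _ hcB, hkeys]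
    · intro k hk
      by_cases hkk : k = pvKey f
      · subst hkk
        refine ⟨f, [], ?_, ?_⟩
        · rw [hstepA, PySem.Dict.getD_insert_self]
        · rw [hstepB, PySem.Dict.getD_insert_self]; rfl
      · rw [hstepA, PySem.Dict.contains_insert] at hk
        rcases Bool.or_eq_true_iff.mp hk with h1 | h1
        · exact absurd (eq_of_beq h1) hkk
        · obtain ⟨x', t', hA', hB'⟩ := hval k h1
          exact ⟨x', t', by rw [hstepA, PySem.Dict.getD_insert_of_ne _ _ _ hkk, hA'],
            by rw [hstepB, PySem.Dict.getD_insert_of_ne _ _ _ hkk, hB']⟩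

lemma pvInv_foldl (l : List String) (dA : PySem.Dict String (List String))
    (dB : PySem.Dict String String) (h : pvInv dA dB) :
    pvInv (l.foldl pvStepA dA) (l.foldl pvStepB dB) := by
  induction l generalizing dA dB with
  | nil => exact h
  | cons f t ih => exact ih _ _ (pvInv_step dA dB f h)

-- last element of a stable sort of a nonempty list of strings = its running maximum
lemma pvLastSorted (x : String) (t : List String) :
    PySem.List.pyGetD (PySem.List.sorted (x :: t) (fun y => y) false) (-1) "" = t.foldl max x := by
  set s := PySem.List.sorted (x :: t) (fun y => y) false with hs
  have hsne : s ≠ [] := by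
    rw [hs, Ne, PySem.List.sorted_eq_nil_iff]
    exact List.cons_ne_nil x t
  have hl : 1 ≤ s.length := List.length_pos_iff.mpr hsne
  -- s[-1] is the last element of s
  simp only [PySem.List.pyGetD, PySem.List.pyGet?, PySem.List.pyIdx?, Int.reduceNeg, Int.neg_nonneg,
    Int.reduceLE, ↓reduceIte, neg_le_neg_iff, Nat.one_le_cast, neg_neg, Int.toNat_one]
  rw [if_pos hl, Option.bind_some, List.getElem?_eq_getElem (by omega), Option.getD_some]
  -- the last element of the sorted list is the maximum, i.e. the running max
  have hm : PySem.List.max? (x :: t) (fun y => y) = some (t.foldl max x) :=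
    PySem.List.max?_id_cons x t
  apply le_antisymm
  · exact PySem.List.max?_isMax hm _ ((PySem.List.mem_sorted _ _ _ _).mp (List.getElem_mem _))
  · have hmem : t.foldl max x ∈ s :=
      (PySem.List.mem_sorted _ _ _ _).mpr (PySem.List.max?_mem hm)
    obtain ⟨i, hi, hieq⟩ := List.getElem_of_mem hmem
    have hmono := PySem.List.sorted_id_getElem_mono (x :: t) (p := i) (q := s.length - 1)
      (by omega) (by rw [← hs]; omega)
    rw [← hieq]
    simpa only [← hs] using hmono

theorem to_latest_ver_spec : Claim_equal_to_latest_ver := by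
  intro l _hd
  show to_latest_ver l = to_latest_ver_alt l
  obtain ⟨hnd, hkeys, hval⟩ := pvInv_foldl l PySem.Dict.empty PySem.Dict.empty pvInv_empty
  unfold to_latest_ver to_latest_ver_alt
  rw [PySem.List.foldl_append_singleton_eq_map]
  rw [PySem.Dict.values_eq_map_keys _ hnd [], PySem.Dict.values_eq_map_keys _ (hkeys ▸ hnd) ""]
  rw [← hkeys, List.map_map, List.nil_append]
  apply List.map_congr_left
  intro k hk
  have hc := (PySem.Dict.contains_iff_mem_keys _ k).mpr hk
  obtain ⟨x, t, hA, hB⟩ := hval k hc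
  simp only [Function.comp]
  rw [hA, hB]
  exact pvLastSorted x t
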